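-- pv_equiv track=rewrite | github.com/BangLiu/ACS-QG | data_loader/FQG_data_utils.py | get_related_words_ids_mat_with_related_words_dict
-- ===== SOURCE A (Python) =====
-- def get_related_words_ids_mat_with_related_words_dict(word2id_dict, topN, related_words_dict):
--     """
--     Given a vocab of words, return each word's glove related words as a 2D matrix
--     with pre-calculated related_words_dict.
--     """
--     id2word_dict = dict([[v, k] for k, v in word2id_dict.items()])
--     related_words_ids_mat = []
--     for idx in range(len(id2word_dict)):
--         token = id2word_dict[idx]
--         if token in related_words_dict:
--             related_words = related_words_dict[token]["semantic_related"]
--         else: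
--             related_words = []  # NOTICE: do we need to always put itself as first related word?
--         related_ids = [word2id_dict[w] if w in word2id_dict else -1 for w in related_words]
--         related_ids_padded = [-1] * topN  # -1 is pad id to indicate non word
--         related_ids_padded[:min(len(related_ids), topN)] = related_ids[:topN]
--         related_words_ids_mat.append(related_ids_padded)
--     return related_words_ids_mat
-- ===== SOURCE B (Python) =====
-- def get_related_words_ids_mat_with_related_words_dict(word2id_dict, topN, related_words_dict):
--     def padded_ids(words):
--         row = [word2id_dict.get(w, -1) for w in words][:topN]
--         return row + [-1] * (topN - len(row))
--
--     # pass 1: translate the whole related_words_dict once into finished padded id rows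
--     table = {tok: padded_ids(entry.get("semantic_related", []))
--              for tok, entry in related_words_dict.items()}
--     default_row = padded_ids([])
--     # pass 2: scatter finished rows by id over the vocab (last write wins, as in dict inversion)
--     rows = {idx: table.get(tok, default_row) for tok, idx in word2id_dict.items()}
--     # pass 3: gather in id order (missing index raises KeyError, like A's id2word_dict[idx])
--     return [rows[i] for i in range(len(rows))]
-- ===== Notes on version B (the rewrite author's own statement) =====
-- stated objective: alternative
-- what changed: B never inverts word2id into id2word and never does a per-vocab-id related-words lookup: it first translates the entire related_words_dict into finished padded id rows (one pass over related_words_dict), then scatters those precomputed rows by id over word2id items, then gathers by range; the slice-assignment padding becomes take-then-pad.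
import Mathlib
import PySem

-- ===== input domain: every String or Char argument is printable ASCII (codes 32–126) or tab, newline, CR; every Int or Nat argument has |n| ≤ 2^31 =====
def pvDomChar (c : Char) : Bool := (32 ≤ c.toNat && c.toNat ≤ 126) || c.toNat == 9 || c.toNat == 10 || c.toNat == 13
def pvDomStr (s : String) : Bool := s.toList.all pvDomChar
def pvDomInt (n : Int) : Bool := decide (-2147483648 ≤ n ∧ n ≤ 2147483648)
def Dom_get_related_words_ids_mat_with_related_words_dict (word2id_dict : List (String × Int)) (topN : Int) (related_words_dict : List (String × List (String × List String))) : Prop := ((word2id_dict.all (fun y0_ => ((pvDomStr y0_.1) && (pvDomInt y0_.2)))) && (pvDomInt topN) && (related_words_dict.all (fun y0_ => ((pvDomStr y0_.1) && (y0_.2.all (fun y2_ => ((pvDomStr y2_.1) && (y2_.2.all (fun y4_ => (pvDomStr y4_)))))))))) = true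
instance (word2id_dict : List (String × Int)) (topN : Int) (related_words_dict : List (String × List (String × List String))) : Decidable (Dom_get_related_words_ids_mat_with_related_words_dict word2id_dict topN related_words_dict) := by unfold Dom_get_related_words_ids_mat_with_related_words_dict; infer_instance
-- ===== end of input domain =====

-- B replaces A's invert-id2word-then-lookup-per-id pass by: translate all of related_words_dict
-- into finished padded id rows once, scatter those rows by id over word2id items, gather by range
-- (objective: alternative decomposition; equivalence is about the return value only — neither program mutates its arguments).

-- ===== PORT A =====
def get_related_words_ids_mat_with_related_words_dict (word2id_dict : List (String × Int)) (topN : Int) (related_words_dict : List (String × List (String × List String))) : List (List Int) :=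
  -- id2word_dict = dict([[v, k] for k, v in word2id_dict.items()])
  let id2word_dict : PySem.Dict Int String :=
    word2id_dict.foldl (fun d kv => d.insert kv.2 kv.1) PySem.Dict.empty
  -- for idx in range(len(id2word_dict)): … related_words_ids_mat.append(…)
  (PySem.List.pyRange 0 (id2word_dict.size : Int) 1).foldl (fun mat idx =>
    let token := (id2word_dict.get? idx).getD ""   -- id2word_dict[idx]; KeyError excluded by Pre_
    let related_words : List String :=
      if (PySem.Dict.mk related_words_dict).contains token then
        -- related_words_dict[token]["semantic_related"]; KeyError excluded by Pre_
        ((PySem.Dict.mk (((PySem.Dict.mk related_words_dict).get? token).getD [])).get? "semantic_related").getD []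
      else []
    let related_ids := related_words.map (fun w =>
      if (PySem.Dict.mk word2id_dict).contains w then ((PySem.Dict.mk word2id_dict).get? w).getD (-1) else -1)
    let related_ids_padded : List Int := List.replicate topN.toNat (-1)
    -- related_ids_padded[:min(len(related_ids), topN)] = related_ids[:topN]
    mat ++ [PySem.List.slice related_ids none (some topN) ++
            PySem.List.slice related_ids_padded (some (min (related_ids.length : Int) topN)) none])
    []

-- ===== PORT B =====
-- padded_ids(words): map words to ids (-1 for OOV), take topN, pad with -1 up to topN
def pvPaddedIds (word2id_dict : List (String × Int)) (topN : Int) (words : List String) : List Int :=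
  let row := PySem.List.slice (words.map (fun w => (PySem.Dict.mk word2id_dict).getD w (-1))) none (some topN)
  row ++ List.replicate (topN - (row.length : Int)).toNat (-1)

def get_related_words_ids_mat_with_related_words_dict_alt (word2id_dict : List (String × Int)) (topN : Int) (related_words_dict : List (String × List (String × List String))) : List (List Int) :=
  -- table = {tok: padded_ids(entry.get("semantic_related", [])) for tok, entry in related_words_dict.items()}
  let table : PySem.Dict String (List Int) :=
    PySem.Dict.mk (related_words_dict.map (fun p =>
      (p.1, pvPaddedIds word2id_dict topN (((PySem.Dict.mk p.2).get? "semantic_related").getD []))))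
  let default_row := pvPaddedIds word2id_dict topN []
  -- rows = {idx: table.get(tok, default_row) for tok, idx in word2id_dict.items()}
  let rows : PySem.Dict Int (List Int) :=
    word2id_dict.foldl (fun d kv => d.insert kv.2 ((table.get? kv.1).getD default_row)) PySem.Dict.empty
  -- [rows[i] for i in range(len(rows))]; KeyError excluded by Pre_
  (PySem.List.pyRange 0 (rows.size : Int) 1).map (fun i => (rows.get? i).getD [])

-- ===== PRECONDITION & SPEC =====
-- ids are exactly 0..n-1 after dict inversion (else id2word_dict[idx] / rows[i] raises KeyError)
def pvIdsOk (word2id_dict : List (String × Int)) : Bool :=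
  word2id_dict.all (fun p => 0 ≤ p.2 && p.2 < ((PySem.List.dedup (word2id_dict.map Prod.snd)).length : Int))
-- a token's related_words_dict entry, if present, carries the "semantic_related" key
def pvInnerOk (related_words_dict : List (String × List (String × List String))) (tok : String) : Bool :=
  match (PySem.Dict.mk related_words_dict).get? tok with
  | none => true
  | some entry => ((PySem.Dict.mk entry).get? "semantic_related").isSome
-- every looked-up token (the LAST word2id key for each id, i.e. the dict-inversion survivor) has a well-formed entry
def pvSurvivorsOk (word2id_dict : List (String × Int)) (related_words_dict : List (String × List (String × List String))) : Bool :=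
  (word2id_dict.map Prod.snd).all (fun v =>
    (word2id_dict.reverse.find? (fun r => r.2 == v)).all (fun q => pvInnerOk related_words_dict q.1))

-- Pre_ excludes exactly the inputs on which Python A raises KeyError: word2id ids that are not exactly
-- 0..n-1 after dict inversion (B raises there too), or a looked-up (surviving) token whose
-- related_words_dict entry lacks the "semantic_related" key (B returns an all-pad row there).
def Pre_get_related_words_ids_mat_with_related_words_dict (word2id_dict : List (String × Int)) (topN : Int) (related_words_dict : List (String × List (String × List String))) : Prop :=
  pvIdsOk word2id_dict = true ∧ pvSurvivorsOk word2id_dict related_words_dict = true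
instance (word2id_dict : List (String × Int)) (topN : Int) (related_words_dict : List (String × List (String × List String))) : Decidable (Pre_get_related_words_ids_mat_with_related_words_dict word2id_dict topN related_words_dict) := by unfold Pre_get_related_words_ids_mat_with_related_words_dict; infer_instance

def pvWitness_get_related_words_ids_mat_with_related_words_dict : (List (String × Int)) × Int × (List (String × List (String × List String))) :=
  ([("a", 0), ("b", 1)], 2, [("a", [("semantic_related", ["b", "z"])])])

def Spec_get_related_words_ids_mat_with_related_words_dict (word2id_dict : List (String × Int)) (topN : Int) (related_words_dict : List (String × List (String × List String))) (out : List (List Int)) : Prop := out = get_related_words_ids_mat_with_related_words_dict_alt word2id_dict topN related_words_dict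
instance (word2id_dict : List (String × Int)) (topN : Int) (related_words_dict : List (String × List (String × List String))) (out : List (List Int)) : Decidable (Spec_get_related_words_ids_mat_with_related_words_dict word2id_dict topN related_words_dict out) := by unfold Spec_get_related_words_ids_mat_with_related_words_dict; infer_instance

-- ===== CLAIM (what is proved, stated in full; the proofs are below) =====
def Claim_equal_get_related_words_ids_mat_with_related_words_dict : Prop := ∀ (word2id_dict : List (String × Int)) (topN : Int) (related_words_dict : List (String × List (String × List String))), Dom_get_related_words_ids_mat_with_related_words_dict word2id_dict topN related_words_dict → Pre_get_related_words_ids_mat_with_related_words_dict word2id_dict topN related_words_dict → Spec_get_related_words_ids_mat_with_related_words_dict word2id_dict topN related_words_dict (get_related_words_ids_mat_with_related_words_dict word2id_dict topN related_words_dict)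

-- ===== LEMMAS AND PROOFS =====

-- A's per-token row, as A computes it (proof-only helper; A's loop body is definitionally mat ++ [pvRowA … token])
def pvRowA (word2id_dict : List (String × Int)) (topN : Int) (related_words_dict : List (String × List (String × List String))) (token : String) : List Int :=
  let related_words : List String :=
    if (PySem.Dict.mk related_words_dict).contains token then
      ((PySem.Dict.mk (((PySem.Dict.mk related_words_dict).get? token).getD [])).get? "semantic_related").getD []
    else []
  let related_ids := related_words.map (fun w =>
    if (PySem.Dict.mk word2id_dict).contains w then ((PySem.Dict.mk word2id_dict).get? w).getD (-1) else -1)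
  PySem.List.slice related_ids none (some topN) ++
    PySem.List.slice (List.replicate topN.toNat (-1)) (some (min (related_ids.length : Int) topN)) none

-- B's per-token row: the padded row of the token's (first-match) related words
def pvRowB (word2id_dict : List (String × Int)) (topN : Int) (related_words_dict : List (String × List (String × List String))) (token : String) : List Int :=
  pvPaddedIds word2id_dict topN
    (((PySem.Dict.mk (((PySem.Dict.mk related_words_dict).get? token).getD [])).get? "semantic_related").getD [])

theorem pvLookup_eq (d : PySem.Dict String Int) (w : String) :
    (if d.contains w then (d.get? w).getD (-1) else (-1 : Int)) = d.getD w (-1) := by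
  rw [PySem.Dict.contains_eq_isSome_get?, PySem.Dict.getD_eq_get?_getD]
  cases d.get? w <;> simp

theorem pvPad_eq (ids : List Int) (topN : Int) :
    PySem.List.slice (List.replicate topN.toNat (-1)) (some (min (ids.length : Int) topN)) none
    = List.replicate (topN - ((PySem.List.slice ids none (some topN)).length : Int)).toNat (-1) := by
  by_cases h : 0 ≤ topN
  · rw [PySem.List.slice_to _ h]
    have hm : (min (ids.length : Int) topN) = ((min ids.length topN.toNat : Nat) : Int) := by omega
    rw [hm, PySem.List.slice_some_none, PySem.List.clampIdx_natCast, List.drop_replicate]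
    congr 1
    simp [List.length_take]
    omega
  · have h1 : topN.toNat = 0 := by omega
    have h2 : (topN - ((PySem.List.slice ids none (some topN)).length : Int)).toNat = 0 := by
      have : (0:Int) ≤ ((PySem.List.slice ids none (some topN)).length : Int) := by positivity
      omega
    rw [h1, h2]
    simp [PySem.List.slice_some_none]

theorem pvRowA_eq_pvRowB (word2id_dict : List (String × Int)) (topN : Int) (related_words_dict : List (String × List (String × List String))) (token : String) :
    pvRowA word2id_dict topN related_words_dict token = pvRowB word2id_dict topN related_words_dict token := by
  simp only [pvRowA, pvRowB, pvPaddedIds]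
  have hrw : (if (PySem.Dict.mk related_words_dict).contains token then
        ((PySem.Dict.mk (((PySem.Dict.mk related_words_dict).get? token).getD [])).get? "semantic_related").getD []
      else ([] : List String))
      = ((PySem.Dict.mk (((PySem.Dict.mk related_words_dict).get? token).getD [])).get? "semantic_related").getD [] := by
    rw [PySem.Dict.contains_eq_isSome_get?]
    cases h : (PySem.Dict.mk related_words_dict).get? token with
    | none => simp [PySem.Dict.get?]
    | some entry => simp
  rw [hrw]
  simp only [pvLookup_eq]
  rw [pvPad_eq]

-- a value-mapped literal dict looks up to the mapped first match
theorem pvMapDict_get? {α β : Type} (g : α → β) (l : List (String × α)) (tok : String) :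
    (PySem.Dict.mk (l.map (fun p => (p.1, g p.2)))).get? tok
    = Option.map g ((PySem.Dict.mk l).get? tok) := by
  induction l with
  | nil => simp [PySem.Dict.get?]
  | cons p tl ih =>
    simp only [List.map_cons]
    rw [PySem.Dict.get?_mk_cons, PySem.Dict.get?_mk_cons]
    by_cases h : p.1 == tok <;> simp [h, ih]

-- B's table lookup with default is exactly B's per-token row
theorem pvTable_get (word2id_dict : List (String × Int)) (topN : Int) (related_words_dict : List (String × List (String × List String))) (tok : String) :
    ((PySem.Dict.mk (related_words_dict.map (fun p =>
        (p.1, pvPaddedIds word2id_dict topN (((PySem.Dict.mk p.2).get? "semantic_related").getD []))))).get? tok).getD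
      (pvPaddedIds word2id_dict topN [])
    = pvRowB word2id_dict topN related_words_dict tok := by
  rw [pvMapDict_get? (g := fun e => pvPaddedIds word2id_dict topN (((PySem.Dict.mk e).get? "semantic_related").getD []))]
  unfold pvRowB
  cases h : (PySem.Dict.mk related_words_dict).get? tok with
  | none => simp [PySem.Dict.get?]
  | some entry => simp

-- mapping a dict's values commutes with insert / with the scatter fold
def pvValMap (g : String → List Int) (d : PySem.Dict Int String) : PySem.Dict Int (List Int) :=
  PySem.Dict.mk (d.items.map (fun p => (p.1, g p.2)))

theorem pvValMap_insert_aux (g : String → List Int) (d : PySem.Dict Int String) (k : Int) (v : String) :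
    PySem.Dict.mk ((d.insert k v).items.map (fun p => (p.1, g p.2)))
    = (PySem.Dict.mk (d.items.map (fun p => (p.1, g p.2)))).insert k (g v) := by
  have hkeys : (PySem.Dict.mk (d.items.map (fun p => (p.1, g p.2)))).keys = d.keys := by
    simp only [PySem.Dict.keys, List.map_map]
    rfl
  have hc : (PySem.Dict.mk (d.items.map (fun p => (p.1, g p.2)))).contains k = d.contains k := by
    rw [PySem.Dict.contains_eq_decide_mem_keys, PySem.Dict.contains_eq_decide_mem_keys, hkeys]
  apply PySem.Dict.ext
  by_cases h : d.contains k = true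
  · rw [PySem.Dict.items_insert_of_contains (h := h)]
    rw [PySem.Dict.items_insert_of_contains (h := by rw [hc]; exact h)]
    simp only [List.map_map]
    apply List.map_congr_left
    intro p _
    by_cases hp : p.1 = k <;> simp [hp]
  · have h' : d.contains k = false := by simpa using h
    rw [PySem.Dict.items_insert_of_not_contains (h := h')]
    rw [PySem.Dict.items_insert_of_not_contains (h := by rw [hc]; exact h')]
    simp

theorem pvValMap_insert (g : String → List Int) (d : PySem.Dict Int String) (k : Int) (v : String) :
    pvValMap g (d.insert k v) = (pvValMap g d).insert k (g v) := pvValMap_insert_aux g d k v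

theorem pvValMap_fold (g : String → List Int) (l : List (String × Int)) (d : PySem.Dict Int String) :
    l.foldl (fun r kv => r.insert kv.2 (g kv.1)) (pvValMap g d)
    = pvValMap g (l.foldl (fun d kv => d.insert kv.2 kv.1) d) := by
  induction l generalizing d with
  | nil => rfl
  | cons kv tl ih =>
    simp only [List.foldl_cons]
    rw [← pvValMap_insert, ih]

theorem pvValMap_get?_aux (g : String → List Int) (l : List (Int × String)) (i : Int) :
    (PySem.Dict.mk (l.map (fun p => (p.1, g p.2)))).get? i = Option.map g ((PySem.Dict.mk l).get? i) := by
  induction l with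
  | nil => simp [PySem.Dict.get?]
  | cons p tl ih =>
    simp only [List.map_cons]
    rw [PySem.Dict.get?_mk_cons, PySem.Dict.get?_mk_cons]
    by_cases h : p.1 == i <;> simp [h, ih]

theorem pvValMap_get? (g : String → List Int) (d : PySem.Dict Int String) (i : Int) :
    (pvValMap g d).get? i = Option.map g (d.get? i) := pvValMap_get?_aux g d.items i

theorem pvValMap_size (g : String → List Int) (d : PySem.Dict Int String) :
    (pvValMap g d).size = d.size := by
  simp [pvValMap, PySem.Dict.size]

-- the inverted dict's keys are the distinct ids, and Pre_ makes every index 0..n-1 a key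
theorem pvKeys_fold (l : List (String × Int)) :
    (l.foldl (fun d kv => d.insert kv.2 kv.1) PySem.Dict.empty).keys
    = PySem.Set.ofList (l.map Prod.snd) := by
  rw [PySem.Dict.keys_foldl_insert_key (key := Prod.snd) (f := fun d kv => kv.1)]
  simp [PySem.Dict.keys_empty, PySem.Set.update_nil_left]

theorem pvPigeon (vals : List Int)
    (h : ∀ v ∈ vals, 0 ≤ v ∧ v < ((PySem.Set.ofList vals).length : Int))
    (i : Int) (h0 : 0 ≤ i) (hi : i < ((PySem.Set.ofList vals).length : Int)) : i ∈ vals := by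
  set S := PySem.Set.ofList vals with hS
  have hnd : S.Nodup := PySem.Set.nodup_ofList vals
  have hsub : S.toFinset ⊆ Finset.Ico (0 : ℤ) (S.length : ℤ) := by
    intro x hx
    rw [List.mem_toFinset] at hx
    have hxv : x ∈ vals := (PySem.Set.mem_ofList _ _).mp hx
    rw [Finset.mem_Ico]
    exact h x hxv
  have hcard : (Finset.Ico (0 : ℤ) (S.length : ℤ)).card = S.length := by
    rw [Int.card_Ico]; omega
  have hcard2 : S.toFinset.card = S.length := List.toFinset_card_of_nodup hnd
  have heq : S.toFinset = Finset.Ico (0 : ℤ) (S.length : ℤ) :=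
    Finset.eq_of_subset_of_card_le hsub (by rw [hcard, hcard2])
  have : i ∈ S.toFinset := by rw [heq, Finset.mem_Ico]; exact ⟨h0, hi⟩
  rw [List.mem_toFinset] at this
  exact (PySem.Set.mem_ofList _ _).mp this

-- ===== VERDICT (by name: the statement is the Claim_ definition above) =====
theorem get_related_words_ids_mat_with_related_words_dict_spec : Claim_equal_get_related_words_ids_mat_with_related_words_dict := by
  intro w2i topN rwd _hDom hPre
  obtain ⟨hPre1b, _hPre2⟩ := hPre
  have hPre1 : ∀ p ∈ w2i, 0 ≤ p.2 ∧ p.2 < ((PySem.List.dedup (w2i.map Prod.snd)).length : Int) := by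
    intro p hp
    have := (List.all_eq_true.mp hPre1b) p hp
    simpa using this
  unfold Spec_get_related_words_ids_mat_with_related_words_dict
  have hA : get_related_words_ids_mat_with_related_words_dict w2i topN rwd
      = (PySem.List.pyRange 0 (((w2i.foldl (fun d kv => d.insert kv.2 kv.1) PySem.Dict.empty).size : Int)) 1).map
          (fun i => pvRowA w2i topN rwd (((w2i.foldl (fun d kv => d.insert kv.2 kv.1) PySem.Dict.empty).get? i).getD "")) := by
    show (PySem.List.pyRange 0 (((w2i.foldl (fun d kv => d.insert kv.2 kv.1) PySem.Dict.empty).size : Int)) 1).foldl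
        (fun mat idx => mat ++ [pvRowA w2i topN rwd (((w2i.foldl (fun d kv => d.insert kv.2 kv.1) PySem.Dict.empty).get? idx).getD "")]) [] = _
    rw [PySem.List.foldl_append_singleton_eq_map]
    simp
  have hfold := pvValMap_fold (pvRowB w2i topN rwd) w2i PySem.Dict.empty
  have hempty : pvValMap (pvRowB w2i topN rwd) PySem.Dict.empty = PySem.Dict.empty := rfl
  rw [hempty] at hfold
  have hB : get_related_words_ids_mat_with_related_words_dict_alt w2i topN rwd
      = (PySem.List.pyRange 0 (((pvValMap (pvRowB w2i topN rwd) (w2i.foldl (fun d kv => d.insert kv.2 kv.1) PySem.Dict.empty)).size : Int)) 1).map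
          (fun i => ((pvValMap (pvRowB w2i topN rwd) (w2i.foldl (fun d kv => d.insert kv.2 kv.1) PySem.Dict.empty)).get? i).getD []) := by
    show (PySem.List.pyRange 0 (((w2i.foldl (fun d kv => d.insert kv.2
          (((PySem.Dict.mk (rwd.map (fun p => (p.1, pvPaddedIds w2i topN (((PySem.Dict.mk p.2).get? "semantic_related").getD []))))).get? kv.1).getD
            (pvPaddedIds w2i topN []))) PySem.Dict.empty).size : Int)) 1).map
        (fun i => ((w2i.foldl (fun d kv => d.insert kv.2
          (((PySem.Dict.mk (rwd.map (fun p => (p.1, pvPaddedIds w2i topN (((PySem.Dict.mk p.2).get? "semantic_related").getD []))))).get? kv.1).getD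
            (pvPaddedIds w2i topN []))) PySem.Dict.empty).get? i).getD []) = _
    have hbody : (fun (d : PySem.Dict Int (List Int)) (kv : String × Int) => d.insert kv.2
          (((PySem.Dict.mk (rwd.map (fun p => (p.1, pvPaddedIds w2i topN (((PySem.Dict.mk p.2).get? "semantic_related").getD []))))).get? kv.1).getD
            (pvPaddedIds w2i topN [])))
        = (fun (d : PySem.Dict Int (List Int)) (kv : String × Int) => d.insert kv.2 (pvRowB w2i topN rwd kv.1)) := by
      funext d kv
      rw [pvTable_get]
    rw [hbody, hfold]
  rw [hA, hB, pvValMap_size]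
  have hsz : (w2i.foldl (fun d kv => d.insert kv.2 kv.1) PySem.Dict.empty).size
      = (PySem.Set.ofList (w2i.map Prod.snd)).length := by
    have : (w2i.foldl (fun d kv => d.insert kv.2 kv.1) PySem.Dict.empty).size
        = (w2i.foldl (fun d kv => d.insert kv.2 kv.1) PySem.Dict.empty).keys.length := by
      simp [PySem.Dict.size, PySem.Dict.keys]
    rw [this, pvKeys_fold]
  apply List.map_congr_left
  intro i hi
  rw [PySem.List.mem_pyRange_one] at hi
  obtain ⟨h0, hi'⟩ := hi
  rw [hsz] at hi'
  have hvals : ∀ v ∈ w2i.map Prod.snd, 0 ≤ v ∧ v < ((PySem.Set.ofList (w2i.map Prod.snd)).length : Int) := by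
    intro v hv
    rw [List.mem_map] at hv
    obtain ⟨p, hp, rfl⟩ := hv
    have := hPre1 p hp
    simpa using this
  have hmemv : i ∈ w2i.map Prod.snd := pvPigeon _ hvals i h0 hi'
  have hmemk : i ∈ (w2i.foldl (fun d kv => d.insert kv.2 kv.1) PySem.Dict.empty).keys := by
    rw [pvKeys_fold]
    exact (PySem.Set.mem_ofList _ _).mpr hmemv
  have hsome : (w2i.foldl (fun d kv => d.insert kv.2 kv.1) PySem.Dict.empty).get? i ≠ none := by
    intro hnone
    rw [PySem.Dict.get?_eq_none_iff_not_mem_keys] at hnone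
    exact hnone hmemk
  obtain ⟨tok, htok⟩ := Option.ne_none_iff_exists'.mp hsome
  rw [htok, pvValMap_get?, htok]
  simp only [Option.getD_some, Option.map_some]
  exact pvRowA_eq_pvRowB w2i topN rwd tok
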